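-- pv_equiv track=rewrite | github.com/experiment322/college-ubb | 1st year/Laboratories/FP/13/second.py | solution
-- ===== SOURCE A (Python) =====
-- def solution(x, v):
--     s = v[0]
--     for i in range(len(x)):
--         if x[i] == 0:
--             s -= v[i + 1]
--         else:
--             s += v[i + 1]
--     return s >= 0
-- ===== SOURCE B (Python) =====
-- def solution(x, v):
--     s = v[0] + sum(v[1:len(x) + 1])
--     s -= 2 * sum(v[i + 1] for i in range(len(x)) if x[i] == 0)
--     return s >= 0
-- ===== Notes on version B (the rewrite author's own statement) =====
-- stated objective: alternative
-- what changed: B replaces the per-index branching accumulator loop with a closed slice-sum assuming all flags set, then one correction pass subtracting 2*v[i+1] for each zero flag.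
import Mathlib
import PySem

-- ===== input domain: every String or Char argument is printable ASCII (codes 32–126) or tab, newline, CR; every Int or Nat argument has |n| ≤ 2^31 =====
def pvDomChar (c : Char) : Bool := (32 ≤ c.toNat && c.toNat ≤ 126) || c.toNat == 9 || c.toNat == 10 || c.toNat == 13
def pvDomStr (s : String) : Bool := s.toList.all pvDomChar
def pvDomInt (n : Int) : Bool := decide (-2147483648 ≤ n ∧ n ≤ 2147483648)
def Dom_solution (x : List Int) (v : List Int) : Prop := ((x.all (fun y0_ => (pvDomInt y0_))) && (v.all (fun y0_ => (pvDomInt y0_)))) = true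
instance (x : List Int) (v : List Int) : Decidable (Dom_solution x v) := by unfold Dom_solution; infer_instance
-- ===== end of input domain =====

-- B computes the same total by a slice-sum plus a correction pass over zero flags; objective: alternative structure, same cost.

-- ===== PORT A =====
def solution (x : List Int) (v : List Int) : Bool :=
  let s := (PySem.List.pyRange 0 x.length 1).foldl
    (fun s i =>
      if PySem.List.pyGetD x i 0 = 0 then s - PySem.List.pyGetD v (i + 1) 0
      else s + PySem.List.pyGetD v (i + 1) 0)
    (PySem.List.pyGetD v 0 0)
  decide (0 ≤ s)

-- ===== PORT B =====
def solution_alt (x : List Int) (v : List Int) : Bool :=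
  let s := PySem.List.pyGetD v 0 0 + (PySem.List.slice v (some 1) (some ((x.length : Int) + 1))).sum
  let s := s - 2 * (((PySem.List.pyRange 0 x.length 1).filter
      (fun i => PySem.List.pyGetD x i 0 == 0)).map
      (fun i => PySem.List.pyGetD v (i + 1) 0)).sum
  decide (0 ≤ s)

-- ===== PRECONDITION & SPEC =====
-- Pre_: A raises IndexError unless v has at least len(x)+1 elements (it reads v[0] and v[i+1] for every i < len(x)).
def Pre_solution (x : List Int) (v : List Int) : Prop := x.length < v.length
instance (x : List Int) (v : List Int) : Decidable (Pre_solution x v) := by unfold Pre_solution; infer_instance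
def pvWitness_solution : List Int × List Int := ([0, 1], [1, 2, -1])
def Spec_solution (x : List Int) (v : List Int) (out : Bool) : Prop := out = solution_alt x v
instance (x : List Int) (v : List Int) (out : Bool) : Decidable (Spec_solution x v out) := by unfold Spec_solution; infer_instance

-- ===== CLAIM (what is proved, stated in full; the proofs are below) =====
def Claim_equal_solution : Prop := ∀ (x : List Int) (v : List Int), Dom_solution x v → Pre_solution x v → Spec_solution x v (solution x v)

-- ===== LEMMAS AND PROOFS =====

-- Splitting a mapped sum into the all-ones sum minus twice the filtered correction.
theorem pv_filter_sum (l : List Int) (g h : Int → Int) (p : Int → Bool)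
    (hp : ∀ i ∈ l, g i = h i - 2 * (if p i then h i else 0)) :
    (l.map g).sum = (l.map h).sum - 2 * ((l.filter p).map h).sum := by
  induction l with
  | nil => simp
  | cons a t ih =>
    have ha := hp a (by simp)
    have ht := ih (fun i hi => hp i (by simp [hi]))
    by_cases hpa : p a = true <;>
      simp [hpa, ht, ha] <;> ring

-- The slice v[1:n+1] is exactly the list of v[i+1] for i in range(n), when n < len v.
theorem pv_slice_eq_map (v : List Int) (n : Nat) (hv : n < v.length) :
    PySem.List.slice v (some 1) (some ((n : Int) + 1)) =
      (PySem.List.pyRange 0 (n : Int) 1).map (fun i => PySem.List.pyGetD v (i + 1) 0) := by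
  rw [PySem.List.slice_toNat]
  · norm_num
    apply List.ext_getElem
    · simp [PySem.List.length_pyRange_one]
      omega
    · intro k hk1 hk2
      have hkn : k < n := by
        simp [PySem.List.length_pyRange_one] at hk2; omega
      have hk1v : k + 1 < v.length := by omega
      simp [PySem.List.getElem_pyRange_one]
      have h2 : ((k : Int) + 1) = (((k + 1 : Nat)) : Int) := by push_cast; ring
      rw [h2, PySem.List.pyGetD_natCast]
      simp [hk1v]
  · norm_num
  · positivity

-- ===== VERDICT (by name: the statement is the Claim_ definition above) =====
theorem solution_spec : Claim_equal_solution := by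
  intro x v _ hpre
  unfold Spec_solution solution solution_alt
  have hfun :
      (fun (s i : Int) =>
        if PySem.List.pyGetD x i 0 = 0 then s - PySem.List.pyGetD v (i + 1) 0
        else s + PySem.List.pyGetD v (i + 1) 0) =
      (fun (s i : Int) =>
        s + (if PySem.List.pyGetD x i 0 = 0 then -(PySem.List.pyGetD v (i + 1) 0)
             else PySem.List.pyGetD v (i + 1) 0)) := by
    funext s i; split_ifs <;> ring
  rw [hfun, PySem.List.foldl_add]
  rw [pv_slice_eq_map v x.length (by exact_mod_cast hpre)]
  rw [pv_filter_sum (PySem.List.pyRange 0 x.length 1)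
      (fun i => if PySem.List.pyGetD x i 0 = 0 then -(PySem.List.pyGetD v (i + 1) 0)
                else PySem.List.pyGetD v (i + 1) 0)
      (fun i => PySem.List.pyGetD v (i + 1) 0)
      (fun i => PySem.List.pyGetD x i 0 == 0)
      (by intro i _; by_cases h : PySem.List.pyGetD x i 0 = 0 <;> (simp [h]; try ring))]
  simp only [decide_eq_decide]
  constructor <;> intro h <;> omega
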